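-- pv_equiv track=rewrite | github.com/Arthur-LYR/ProjectShowcase | UniversityProjects/ADS/Sorting/sorting.py | special_len_count_sort_routine
-- ===== SOURCE A (Python) =====
-- def special_len_count_sort_routine(data: list, index: int, maximum: int) -> list:
--     """ Similar to len_count_sort_routine but takes a list of (key, value) tuples instead.
--
--     :param data: A list of (key, value) tuples
--     :param index: 0 to sort by key, 1 to sort by value
--     :param maximum: The length of the longest key or value in data
--     :return: A list of (key, value) tuples sorted in ascending order by key length or value length
--
--     :best time complexity: O(N + K) where N is the number of items in data and K is the value of maximum
--     :worst time complexity: O(N + K)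
--
--     :total space complexity: O(N + K)
--     :auxiliary space complexity: O(N + K)
--
--     :see: interest_groups, special_string_rad_sort, len_count_sort_routine
--     """
--     # Initialise Count Array
--     count_array = [None] * (maximum + 1)
--     for i in range(len(count_array)):
--         count_array[i] = []
--
--     # Update Count Array
--     for item in data:
--         count_array[len(item[index])].append(item)
--
--     # Update Input Array
--     index = 0
--     for i in range(len(count_array)):
--         item = count_array[i]
--         for j in range(len(item)):
--             data[index] = item[j]
--             index += 1
--
--     # Return Sorted Array
--     return data
-- ===== SOURCE B (Python) =====
-- def special_len_count_sort_routine(data: list, index: int, maximum: int) -> list: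
--     # Bucket-free re-implementation: one stable gathering pass per length value,
--     # concatenated in ascending length order, then copied back into data in place.
--     ordered = []
--     for length in range(maximum + 1):
--         for item in data:
--             if len(item[index]) == length:
--                 ordered.append(item)
--     data[:] = ordered
--     return data
-- ===== Notes on version B (the rewrite author's own statement) =====
-- stated objective: alternative
-- what changed: B drops A's list-of-lists count array entirely: it makes one stable gathering pass over data per length value 0..maximum and concatenates them, instead of scattering items into buckets and flattening.
import Mathlib
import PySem

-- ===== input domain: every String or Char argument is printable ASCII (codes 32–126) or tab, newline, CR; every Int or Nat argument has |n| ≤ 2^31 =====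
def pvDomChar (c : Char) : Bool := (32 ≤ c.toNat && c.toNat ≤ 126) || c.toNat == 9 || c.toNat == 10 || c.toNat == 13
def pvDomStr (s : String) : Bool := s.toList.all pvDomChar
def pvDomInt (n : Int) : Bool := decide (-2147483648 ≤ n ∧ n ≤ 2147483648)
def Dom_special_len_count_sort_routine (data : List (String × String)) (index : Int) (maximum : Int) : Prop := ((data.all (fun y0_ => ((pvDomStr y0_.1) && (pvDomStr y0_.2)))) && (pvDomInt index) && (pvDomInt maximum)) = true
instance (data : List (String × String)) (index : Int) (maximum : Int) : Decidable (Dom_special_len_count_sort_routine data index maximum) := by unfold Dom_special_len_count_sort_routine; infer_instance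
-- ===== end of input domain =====

-- B replaces A's list-of-lists count array by one stable gathering pass per length value;
-- equivalence is about the RETURN value: the Python A (and B, via data[:] = ...) also mutates `data` in place.
-- ===== PORT A =====
-- item[index] on a pair: exact for index ∈ {-2,-1,0,1}; any other index raises IndexError in Python (excluded by Pre_).
def pvPairGet (index : Int) (p : String × String) : String :=
  if index = 0 ∨ index = -2 then p.1 else p.2

-- len(item[index]) as a Nat (Python len of an ASCII string = number of characters).
def pvLen (index : Int) (p : String × String) : Nat :=
  (pvPairGet index p).toList.length

def special_len_count_sort_routine (data : List (String × String)) (index : Int) (maximum : Int) : List (String × String) :=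
  -- count_array = [[] for _ in range(maximum + 1)]  ([None]*(maximum+1) is empty for maximum < -1, as .toNat gives)
  let ca0 : List (List (String × String)) := List.replicate (maximum + 1).toNat []
  -- for item in data: count_array[len(item[index])].append(item)
  let ca := data.foldl (fun ca item => ca.modify (pvLen index item) (fun b => b ++ [item])) ca0
  -- index = 0; for i ...: for j ...: data[index] = item[j]; index += 1
  (ca.foldl (fun (st : List (String × String) × Nat) bucket =>
      bucket.foldl (fun st it => (st.1.set st.2 it, st.2 + 1)) st) (data, 0)).1

-- ===== PORT B =====
def special_len_count_sort_routine_alt (data : List (String × String)) (index : Int) (maximum : Int) : List (String × String) :=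
  -- ordered = []; for length in range(maximum+1): for item in data: if len(item[index]) == length: ordered.append(item)
  -- data[:] = ordered; return data   (return value = ordered)
  (List.range (maximum + 1).toNat).foldl
    (fun acc length =>
      data.foldl (fun acc item => if pvLen index item = length then acc ++ [item] else acc) acc)
    []

-- ===== PRECONDITION & SPEC =====
-- Pre_ excludes exactly the inputs where the Python A raises: with a nonempty data, an index
-- that is not a valid 2-tuple index, or an item whose selected component is longer than
-- maximum (IndexError); on empty data A never touches index and returns normally.
def Pre_special_len_count_sort_routine (data : List (String × String)) (index : Int) (maximum : Int) : Prop :=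
  data = [] ∨
  ((index = 0 ∨ index = 1 ∨ index = -1 ∨ index = -2) ∧
   ∀ p ∈ data, (pvLen index p : Int) ≤ maximum)
instance (data : List (String × String)) (index : Int) (maximum : Int) : Decidable (Pre_special_len_count_sort_routine data index maximum) := by unfold Pre_special_len_count_sort_routine; infer_instance

def pvWitness_special_len_count_sort_routine : (List (String × String)) × Int × Int :=
  ([("bb", "x"), ("a", "yy"), ("cc", "z")], 0, 3)

def Spec_special_len_count_sort_routine (data : List (String × String)) (index : Int) (maximum : Int) (out : List (String × String)) : Prop := out = special_len_count_sort_routine_alt data index maximum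
instance (data : List (String × String)) (index : Int) (maximum : Int) (out : List (String × String)) : Decidable (Spec_special_len_count_sort_routine data index maximum out) := by unfold Spec_special_len_count_sort_routine; infer_instance

-- ===== CLAIM (what is proved, stated in full; the proofs are below) =====
def Claim_equal_special_len_count_sort_routine : Prop := ∀ (data : List (String × String)) (index : Int) (maximum : Int), Dom_special_len_count_sort_routine data index maximum → Pre_special_len_count_sort_routine data index maximum → Spec_special_len_count_sort_routine data index maximum (special_len_count_sort_routine data index maximum)

-- ===== LEMMAS AND PROOFS =====

-- the bucket-filling loop of A
def pvFill (index : Int) (data : List (String × String)) (ca : List (List (String × String))) : List (List (String × String)) :=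
  data.foldl (fun ca item => ca.modify (pvLen index item) (fun b => b ++ [item])) ca

lemma pvFill_getElem? (index : Int) (data : List (String × String)) (ca : List (List (String × String))) (i : Nat) :
    (pvFill index data ca)[i]? = (ca[i]?).map (· ++ data.filter (fun p => pvLen index p = i)) := by
  induction data generalizing ca with
  | nil => simp [pvFill]
  | cons a t ih =>
      simp only [pvFill, List.foldl_cons] at *
      rw [ih, List.getElem?_modify]
      by_cases h : pvLen index a = i
      · subst h
        cases hc : ca[pvLen index a]? with
        | none => simp
        | some b => simp [List.append_assoc]
      · cases hc : ca[i]? with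
        | none => simp
        | some b => simp [h]

-- the filled count array, elementwise
lemma pvFill_eq_map_range (index : Int) (data : List (String × String)) (K : Nat) :
    pvFill index data (List.replicate K []) =
      (List.range K).map (fun i => data.filter (fun p => pvLen index p = i)) := by
  apply List.ext_getElem?
  intro i
  rw [pvFill_getElem?]
  by_cases hi : i < K
  · rw [List.getElem?_map, List.getElem?_range hi]
    simp [hi]
  · rw [List.getElem?_map]
    rw [List.getElem?_eq_none (by simpa using Nat.le_of_not_lt hi),
        List.getElem?_eq_none (by simpa using Nat.le_of_not_lt hi)]
    rfl

-- the write-back inner loop writes b over the front of rest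
lemma pv_setSeq (b : List (String × String)) (pre rest : List (String × String))
    (h : b.length ≤ rest.length) :
    b.foldl (fun (st : List (String × String) × Nat) it => (st.1.set st.2 it, st.2 + 1)) (pre ++ rest, pre.length)
      = (pre ++ b ++ rest.drop b.length, pre.length + b.length) := by
  induction b generalizing pre rest with
  | nil => simp
  | cons x xs ih =>
      cases rest with
      | nil => simp at h
      | cons r rs =>
          simp only [List.foldl_cons]
          have hset : (pre ++ r :: rs).set pre.length x = (pre ++ [x]) ++ rs := by
            simp
          have hlen : (pre ++ [x]).length = pre.length + 1 := by simp
          rw [hset, ← hlen, ih (pre ++ [x]) rs (by simp at h ⊢; omega)]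
          simp [List.append_assoc]
          omega

-- the write-back outer loop flattens the buckets over the front of rest
lemma pv_writeBack (buckets : List (List (String × String))) (pre rest : List (String × String))
    (h : (buckets.map List.length).sum ≤ rest.length) :
    buckets.foldl (fun (st : List (String × String) × Nat) bucket =>
        bucket.foldl (fun st it => (st.1.set st.2 it, st.2 + 1)) st) (pre ++ rest, pre.length)
      = (pre ++ buckets.flatten ++ rest.drop (buckets.map List.length).sum,
         pre.length + (buckets.map List.length).sum) := by
  induction buckets generalizing pre rest with
  | nil => simp
  | cons b bs ih =>
      simp only [List.foldl_cons]
      rw [pv_setSeq b pre rest (by simp at h; omega)]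
      have hlen : (pre ++ b).length = pre.length + b.length := by simp
      rw [← hlen, ih (pre ++ b) (rest.drop b.length) (by simp at h ⊢; omega)]
      simp [List.append_assoc, List.drop_drop]
      omega

-- a 0/1 indicator summed over range K
lemma pv_indicator_sum (K j : Nat) (h : j < K) :
    ((List.range K).map (fun i => if j = i then (1:Nat) else 0)).sum = 1 := by
  induction K with
  | zero => omega
  | succ n ih =>
      rw [List.sum_range_succ]
      by_cases hj : j = n
      · subst hj
        have h0 : ((List.range j).map (fun i => if j = i then (1:Nat) else 0)).sum = 0 := by
          apply List.sum_eq_zero; intro x hx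
          simp only [List.mem_map, List.mem_range] at hx
          obtain ⟨i, hi, rfl⟩ := hx; rw [if_neg (by omega)]
        simp [h0]
      · have := ih (by omega); simp [hj, this]

-- the buckets partition data, so their sizes add up to data.length
lemma pv_sum_lengths (index : Int) (data : List (String × String)) (K : Nat)
    (h : ∀ p ∈ data, pvLen index p < K) :
    ((List.range K).map (fun i => (data.filter (fun p => pvLen index p = i)).length)).sum
      = data.length := by
  induction data with
  | nil => simp
  | cons a t ih =>
      have ha : pvLen index a < K := h a (by simp)
      have ht : ∀ p ∈ t, pvLen index p < K := fun p hp => h p (by simp [hp])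
      have hpt : ((List.range K).map (fun i => ((a :: t).filter (fun p => pvLen index p = i)).length)).sum
          = ((List.range K).map (fun i => (if pvLen index a = i then (1:Nat) else 0)
              + (t.filter (fun p => pvLen index p = i)).length)).sum := by
        congr 1
        apply List.map_congr_left
        intro i hi
        by_cases hh : pvLen index a = i
        · simp [hh]; omega
        · simp [hh]
      rw [hpt, List.sum_map_add, pv_indicator_sum K _ ha, ih ht]
      simp [Nat.add_comm]

-- B is the flattening of the buckets
lemma pv_alt_eq_flatten (data : List (String × String)) (index : Int) (maximum : Int) :
    special_len_count_sort_routine_alt data index maximum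
      = ((List.range (maximum + 1).toNat).map
          (fun i => data.filter (fun p => pvLen index p = i))).flatten := by
  unfold special_len_count_sort_routine_alt
  have hinner : ∀ (len : Nat) (acc : List (String × String)),
      data.foldl (fun acc item => if pvLen index item = len then acc ++ [item] else acc) acc
        = acc ++ data.filter (fun p => pvLen index p = len) := by
    intro len acc
    simpa using PySem.List.foldl_append_if (fun p => pvLen index p = len) id data acc
  calc (List.range (maximum + 1).toNat).foldl
        (fun acc len => data.foldl (fun acc item => if pvLen index item = len then acc ++ [item] else acc) acc) []
      = (List.range (maximum + 1).toNat).foldl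
        (fun acc len => acc ++ data.filter (fun p => pvLen index p = len)) [] := by
        apply PySem.List.foldl_congr_mem
        intro acc len _
        exact hinner len acc
    _ = (List.range (maximum + 1).toNat).flatMap (fun len => data.filter (fun p => pvLen index p = len)) := by
        simpa using PySem.List.foldl_append_eq_flatMap (fun len => data.filter (fun p => pvLen index p = len)) (List.range (maximum + 1).toNat) []
    _ = _ := List.flatMap_def

-- ===== VERDICT (by name: the statement is the Claim_ definition above) =====
theorem special_len_count_sort_routine_spec : Claim_equal_special_len_count_sort_routine := by
  intro data index maximum _ hpre
  unfold Spec_special_len_count_sort_routine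
  have hK : ∀ p ∈ data, pvLen index p < (maximum + 1).toNat := by
    rcases hpre with rfl | ⟨-, hlen⟩
    · intro p hp; cases hp
    · intro p hp; have := hlen p hp; omega
  rw [pv_alt_eq_flatten]
  unfold special_len_count_sort_routine
  show ((pvFill index data (List.replicate (maximum + 1).toNat [])).foldl _ (data, 0)).1 = _
  rw [pvFill_eq_map_range index data]
  have hsum : (((List.range (maximum + 1).toNat).map
      (fun i => data.filter (fun p => pvLen index p = i))).map List.length).sum = data.length := by
    rw [List.map_map]
    simpa [Function.comp] using pv_sum_lengths index data _ hK
  rw [show ((data, 0) : List (String × String) × Nat) = (([] : List (String × String)) ++ data, ([] : List (String × String)).length) by simp]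
  rw [pv_writeBack _ [] data (by
    simp only [List.map_map]
    exact (pv_sum_lengths index data _ hK).le)]
  simp only [hsum]
  simp
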